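-- pv_equiv track=rewrite | github.com/dgsdhsd/social-conformity | 最终文件目录/3_SGE_Nback.py | find_c_segments1
-- ===== SOURCE A (Python) =====
-- def find_c_segments1(sequence,time_sequence):#这是整体的
--     """
--     Finds continuous segments in a sequence where all elements contain 'C'.
--     Returns a list of tuples (start_index, end_index) for each segment.
--
--     :param sequence: List of strings
--     :return: List of tuples with start and end indices
--     """
--     segments = []
--     start = None  # Track the start of a segment
--     time = None
--     pd=0
--
--     for i, element in enumerate(sequence):
--         if 'C' in element and pd==0:
--             if start is None:  # Start of a new segment
--                 start = i
--                 time=time_sequence[i]+6000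
--                 pd=1
--         elif 'C' in element and pd==1:
--             if time_sequence[i]>time:
--                 segments.append((start, i - 1))
--                 start = None
--                 pd=2
--
--         elif 'C' not in element and pd==2:
--             pd=0
--
--     # Add the last segment if the sequence ends with a 'C' segment
--     if start is not None:
--         segments.append((start, len(sequence) - 1))
--
--     return segments
-- ===== SOURCE B (Python) =====
-- def find_c_segments1(sequence, time_sequence):
--     # Index-jumping rewrite: outer loop over i, inner scan to the segment-closing
--     # element, then a skip over the trailing 'C' run. Same return value as A.
--     segments = []
--     n = len(sequence)
--     i = 0
--     while i < n:
--         if 'C' in sequence[i]: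
--             start = i
--             threshold = time_sequence[i] + 6000
--             j = i + 1
--             while j < n and not ('C' in sequence[j] and time_sequence[j] > threshold):
--                 j += 1
--             if j == n:
--                 segments.append((start, n - 1))
--                 return segments
--             segments.append((start, j - 1))
--             while j < n and 'C' in sequence[j]:
--                 j += 1
--             i = j
--         else:
--             i += 1
--     return segments
-- ===== Notes on version B (the rewrite author's own statement) =====
-- stated objective: alternative
-- what changed: Replaced A's single fold with a pd-flag state machine (start/time/pd variables) by an index-jumping loop: an inner scan finds the segment-closing element, a second scan skips the trailing 'C' run, and the outer loop resumes from there; no flag state survives across iterations.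
-- outside the precondition, e.g. on find_c_segments1(['C', 'C', 'C'], [0, 7000]): A returns [(0, 0)], B returns [(0, 0)]
import Mathlib
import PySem

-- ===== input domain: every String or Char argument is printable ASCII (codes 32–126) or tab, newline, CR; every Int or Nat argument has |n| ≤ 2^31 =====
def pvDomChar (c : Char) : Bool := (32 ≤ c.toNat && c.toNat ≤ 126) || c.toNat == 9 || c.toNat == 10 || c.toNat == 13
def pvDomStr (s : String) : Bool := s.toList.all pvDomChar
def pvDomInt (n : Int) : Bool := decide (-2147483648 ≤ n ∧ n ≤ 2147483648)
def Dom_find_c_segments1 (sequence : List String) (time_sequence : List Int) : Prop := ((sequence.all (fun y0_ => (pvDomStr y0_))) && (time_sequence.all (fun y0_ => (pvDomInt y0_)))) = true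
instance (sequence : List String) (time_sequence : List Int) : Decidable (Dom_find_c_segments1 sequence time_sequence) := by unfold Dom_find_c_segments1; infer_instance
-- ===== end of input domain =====

-- B replaces A's flag/state-machine fold with an index-jumping loop (inner scan to the
-- segment-closing element, then a skip over the trailing 'C' run); objective: alternative
-- decomposition, same cost.

-- ===== PORT A =====
-- one iteration of A's for-loop; state = (segments, start, time, pd)
def aStep (time_sequence : List Int)
    (s : List (Int × Int) × Option Int × Option Int × Int) (p : Int × String) :
    List (Int × Int) × Option Int × Option Int × Int :=
  let segments := s.1
  let start := s.2.1
  let time := s.2.2.1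
  let pd := s.2.2.2
  let i := p.1
  let element := p.2
  if PySem.Str.isIn "C" element = true ∧ pd = 0 then
    if start = none then
      -- time_sequence[i]: i ≥ 0 always here; Pre_ keeps it in range (pyGetD default never read)
      (segments, some i, some (PySem.List.pyGetD time_sequence i 0 + 6000), 1)
    else (segments, start, time, pd)
  else if PySem.Str.isIn "C" element = true ∧ pd = 1 then
    -- 'time' is always 'some' in this state; .getD 0 never reads its default under pd = 1
    if PySem.List.pyGetD time_sequence i 0 > time.getD 0 then
      (segments ++ [(start.getD 0, i - 1)], none, time, 2)
    else (segments, start, time, pd)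
  else if PySem.Str.isIn "C" element = false ∧ pd = 2 then
    (segments, start, time, 0)
  else (segments, start, time, pd)

-- the trailing 'if start is not None: segments.append((start, len-1))'
def aFin (n : Nat) (s : List (Int × Int) × Option Int × Option Int × Int) : List (Int × Int) :=
  match s.2.1 with
  | some st => s.1 ++ [(st, (n : Int) - 1)]
  | none => s.1

def find_c_segments1 (sequence : List String) (time_sequence : List Int) : List (Int × Int) :=
  aFin sequence.length
    ((PySem.List.enumerate sequence).foldl (aStep time_sequence) ([], none, none, 0))

-- ===== PORT B =====
-- inner while: advance j while not ('C' in sequence[j] and time_sequence[j] > threshold).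
-- The extra Nat is fuel making the while loop structurally recursive; every call below
-- passes enough fuel for the loop to hit its own exit condition, never the fuel bound.
def bScan (sequence : List String) (time_sequence : List Int) (threshold : Int) :
    Nat → Nat → Nat
  | 0, j => j
  | fuel + 1, j =>
    if j < sequence.length then
      if PySem.Str.isIn "C" (sequence.getD j "") = true ∧
          PySem.List.pyGetD time_sequence (j : Int) 0 > threshold then j
      else bScan sequence time_sequence threshold fuel (j + 1)
    else j

-- second while: skip the 'C' run (same fuel scheme)
def bSkip (sequence : List String) : Nat → Nat → Nat
  | 0, j => j
  | fuel + 1, j =>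
    if j < sequence.length then
      if PySem.Str.isIn "C" (sequence.getD j "") = true then bSkip sequence fuel (j + 1)
      else j
    else j

-- outer while over i
def bMain (sequence : List String) (time_sequence : List Int) :
    Nat → Nat → List (Int × Int) → List (Int × Int)
  | 0, _, segments => segments
  | fuel + 1, i, segments =>
    if i < sequence.length then
      if PySem.Str.isIn "C" (sequence.getD i "") = true then
        let start := i
        let threshold := PySem.List.pyGetD time_sequence (i : Int) 0 + 6000
        let j := bScan sequence time_sequence threshold sequence.length (i + 1)
        if j = sequence.length then segments ++ [((start : Int), (sequence.length : Int) - 1)]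
        else bMain sequence time_sequence fuel (bSkip sequence sequence.length j)
               (segments ++ [((start : Int), (j : Int) - 1)])
      else bMain sequence time_sequence fuel (i + 1) segments
    else segments

def find_c_segments1_alt (sequence : List String) (time_sequence : List Int) : List (Int × Int) :=
  bMain sequence time_sequence (sequence.length + 1) 0 []

-- ===== PRECONDITION & SPEC =====
-- Pre_ excludes the inputs on which A raises IndexError reading time_sequence at an index whose
-- element contains 'C'; it is slightly narrower than necessary ('C' indices reached only during
-- the post-segment wait state are never read by A — one such excluded-but-returning input is cited).
def Pre_find_c_segments1 (sequence : List String) (time_sequence : List Int) : Prop :=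
  ∀ i : Nat, i < sequence.length → PySem.Str.isIn "C" (sequence.getD i "") = true →
    i < time_sequence.length
instance (sequence : List String) (time_sequence : List Int) : Decidable (Pre_find_c_segments1 sequence time_sequence) := by unfold Pre_find_c_segments1; infer_instance

def pvWitness_find_c_segments1 : List String × List Int := (["C", "x", "aC"], [0, 100, 9000])

def Spec_find_c_segments1 (sequence : List String) (time_sequence : List Int) (out : List (Int × Int)) : Prop := out = find_c_segments1_alt sequence time_sequence
instance (sequence : List String) (time_sequence : List Int) (out : List (Int × Int)) : Decidable (Spec_find_c_segments1 sequence time_sequence out) := by unfold Spec_find_c_segments1; infer_instance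

-- ===== CLAIM (what is proved, stated in full; the proofs are below) =====
def Claim_equal_find_c_segments1 : Prop := ∀ (sequence : List String) (time_sequence : List Int), Dom_find_c_segments1 sequence time_sequence → Pre_find_c_segments1 sequence time_sequence → Spec_find_c_segments1 sequence time_sequence (find_c_segments1 sequence time_sequence)

-- ===== LEMMAS AND PROOFS =====

-- With enough fuel the loops stop at their own exit conditions; these lemmas let the
-- proofs treat bScan/bSkip/bMain as the while loops they transcribe.
theorem bScan_ge (seq : List String) (ts : List Int) (t : Int) :
    ∀ (f j : Nat), j ≤ bScan seq ts t f j := by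
  intro f
  induction f with
  | zero => intro j; simp [bScan]
  | succ f ih =>
    intro j
    simp only [bScan]
    split
    · split
      · exact le_refl _
      · exact le_trans (Nat.le_succ j) (ih (j + 1))
    · exact le_refl _

theorem bSkip_ge (seq : List String) : ∀ (f j : Nat), j ≤ bSkip seq f j := by
  intro f
  induction f with
  | zero => intro j; simp [bSkip]
  | succ f ih =>
    intro j
    simp only [bSkip]
    split
    · split
      · exact le_trans (Nat.le_succ j) (ih (j + 1))
      · exact le_refl _
    · exact le_refl _

theorem bScan_stop (seq : List String) (ts : List Int) (t : Int) (f j : Nat)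
    (h : seq.length ≤ j) : bScan seq ts t f j = j := by
  cases f with
  | zero => simp [bScan]
  | succ f => simp [bScan]; omega

theorem bSkip_stop (seq : List String) (f j : Nat) (h : seq.length ≤ j) :
    bSkip seq f j = j := by
  cases f with
  | zero => simp [bSkip]
  | succ f => simp [bSkip]; omega

theorem bMain_stop (seq : List String) (ts : List Int) (f i : Nat)
    (segs : List (Int × Int)) (h : seq.length ≤ i) : bMain seq ts f i segs = segs := by
  cases f with
  | zero => simp [bMain]
  | succ f => simp [bMain]; omega

theorem bScan_succ (seq : List String) (ts : List Int) (t : Int) :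
    ∀ (f j : Nat), seq.length ≤ f + j → bScan seq ts t (f + 1) j = bScan seq ts t f j := by
  intro f
  induction f with
  | zero =>
    intro j h
    rw [bScan_stop seq ts t 1 j (by omega), bScan_stop seq ts t 0 j (by omega)]
  | succ f ih =>
    intro j h
    by_cases hj : j < seq.length
    · conv_lhs => rw [bScan]
      conv_rhs => rw [bScan]
      simp only [if_pos hj]
      split
      · rfl
      · exact ih (j + 1) (by omega)
    · rw [bScan_stop seq ts t _ j (by omega), bScan_stop seq ts t _ j (by omega)]

theorem bSkip_succ (seq : List String) :
    ∀ (f j : Nat), seq.length ≤ f + j → bSkip seq (f + 1) j = bSkip seq f j := by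
  intro f
  induction f with
  | zero =>
    intro j h
    rw [bSkip_stop seq 1 j (by omega), bSkip_stop seq 0 j (by omega)]
  | succ f ih =>
    intro j h
    by_cases hj : j < seq.length
    · conv_lhs => rw [bSkip]
      conv_rhs => rw [bSkip]
      simp only [if_pos hj]
      split
      · exact ih (j + 1) (by omega)
      · rfl
    · rw [bSkip_stop seq _ j (by omega), bSkip_stop seq _ j (by omega)]

theorem bMain_succ (seq : List String) (ts : List Int) :
    ∀ (f i : Nat) (segs : List (Int × Int)), seq.length ≤ f + i →
      bMain seq ts (f + 1) i segs = bMain seq ts f i segs := by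
  intro f
  induction f with
  | zero =>
    intro i segs h
    rw [bMain_stop seq ts 1 i segs (by omega), bMain_stop seq ts 0 i segs (by omega)]
  | succ f ih =>
    intro i segs h
    by_cases hi : i < seq.length
    · conv_lhs => rw [bMain]
      conv_rhs => rw [bMain]
      simp only [if_pos hi]
      split
      · split
        · rfl
        · refine ih _ _ ?_
          have h1 := bScan_ge seq ts (PySem.List.pyGetD ts (i : Int) 0 + 6000) seq.length (i + 1)
          have h2 := bSkip_ge seq seq.length (bScan seq ts (PySem.List.pyGetD ts (i : Int) 0 + 6000) seq.length (i + 1))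
          omega
      · exact ih _ _ (by omega)
    · rw [bMain_stop seq ts _ i segs (by omega), bMain_stop seq ts _ i segs (by omega)]

-- one-step unfoldings at sufficient fuel (fuel stays constant across the step)
theorem bScan_step (seq : List String) (ts : List Int) (t : Int) (f j : Nat)
    (hf : 0 < f) (h : seq.length ≤ f + j) :
    bScan seq ts t f j =
      if j < seq.length then
        if PySem.Str.isIn "C" (seq.getD j "") = true ∧
            PySem.List.pyGetD ts (j : Int) 0 > t then j
        else bScan seq ts t f (j + 1)
      else j := by
  cases f with
  | zero => omega
  | succ f =>
    conv_lhs => rw [bScan]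
    split
    · split
      · rfl
      · exact (bScan_succ seq ts t f (j + 1) (by omega)).symm
    · rfl

theorem bSkip_step (seq : List String) (f j : Nat) (hf : 0 < f)
    (h : seq.length ≤ f + j) :
    bSkip seq f j =
      if j < seq.length then
        if PySem.Str.isIn "C" (seq.getD j "") = true then bSkip seq f (j + 1) else j
      else j := by
  cases f with
  | zero => omega
  | succ f =>
    conv_lhs => rw [bSkip]
    split
    · split
      · exact (bSkip_succ seq f (j + 1) (by omega)).symm
      · rfl
    · rfl

theorem bMain_step (seq : List String) (ts : List Int) (f i : Nat)
    (segs : List (Int × Int)) (hf : 0 < f) (h : seq.length ≤ f + i) :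
    bMain seq ts f i segs =
      if i < seq.length then
        if PySem.Str.isIn "C" (seq.getD i "") = true then
          if bScan seq ts (PySem.List.pyGetD ts (i : Int) 0 + 6000) seq.length (i + 1)
              = seq.length then
            segs ++ [((i : Int), (seq.length : Int) - 1)]
          else
            bMain seq ts f
              (bSkip seq seq.length
                (bScan seq ts (PySem.List.pyGetD ts (i : Int) 0 + 6000) seq.length (i + 1)))
              (segs ++ [((i : Int),
                ((bScan seq ts (PySem.List.pyGetD ts (i : Int) 0 + 6000) seq.length (i + 1) : Nat) : Int) - 1)])
        else bMain seq ts f (i + 1) segs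
      else segs := by
  cases f with
  | zero => omega
  | succ f =>
    conv_lhs => rw [bMain]
    split
    · split
      · dsimp only
        split
        · rfl
        · refine (bMain_succ seq ts f _ _ ?_).symm
          have h1 := bScan_ge seq ts (PySem.List.pyGetD ts (i : Int) 0 + 6000) seq.length (i + 1)
          have h2 := bSkip_ge seq seq.length (bScan seq ts (PySem.List.pyGetD ts (i : Int) 0 + 6000) seq.length (i + 1))
          omega
      · exact (bMain_succ seq ts f (i + 1) segs (by omega)).symm
    · rfl

-- Loop correspondence: from any position i, A's fold over the remaining enumerated suffix,
-- finalized, equals B's loop — one clause per reachable value of A's pd flag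
-- (pd=0 idle, pd=1 inside a segment, pd=2 waiting for a non-'C' element).
theorem pvLoop (seq : List String) (ts : List Int) :
    ∀ (l : List String) (i : Nat), seq.drop i = l → i ≤ seq.length →
    ((∀ (acc : List (Int × Int)) (t : Option Int),
        aFin seq.length ((PySem.List.enumerate l (i : Int)).foldl (aStep ts) (acc, none, t, 0))
          = bMain seq ts (seq.length + 1) i acc)
  ∧ (∀ (acc : List (Int × Int)) (st t : Int),
        aFin seq.length ((PySem.List.enumerate l (i : Int)).foldl (aStep ts) (acc, some st, some t, 1))
          = (if bScan seq ts t seq.length i = seq.length then acc ++ [(st, (seq.length : Int) - 1)]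
             else bMain seq ts (seq.length + 1) (bSkip seq seq.length (bScan seq ts t seq.length i))
                    (acc ++ [(st, ((bScan seq ts t seq.length i : Nat) : Int) - 1)])))
  ∧ (∀ (acc : List (Int × Int)) (t : Option Int),
        aFin seq.length ((PySem.List.enumerate l (i : Int)).foldl (aStep ts) (acc, none, t, 2))
          = bMain seq ts (seq.length + 1) (bSkip seq seq.length i) acc)) := by
  intro l
  induction l with
  | nil =>
    intro i hdrop hle
    have hin : seq.length ≤ i := List.drop_eq_nil_iff.mp hdrop
    have hi : i = seq.length := le_antisymm hle hin
    refine ⟨?_, ?_, ?_⟩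
    · intro acc t
      rw [bMain_stop seq ts _ i acc (by omega)]
      simp [PySem.List.enumerate, aFin]
    · intro acc st t
      rw [bScan_stop seq ts t _ i (by omega)]
      simp [PySem.List.enumerate, aFin, hi]
    · intro acc t
      rw [bSkip_stop seq _ i (by omega), bMain_stop seq ts _ i acc (by omega)]
      simp [PySem.List.enumerate, aFin]
  | cons e l' ih =>
    intro i hdrop hle
    have hlt : i < seq.length := by
      by_contra h
      rw [List.drop_eq_nil_iff.mpr (by omega)] at hdrop
      simp at hdrop
    have hget? : seq[i]? = some e := by
      have : (seq.drop i)[0]? = some e := by rw [hdrop]; rfl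
      simpa using this
    have hdrop' : seq.drop (i + 1) = l' := by
      have : (seq.drop i).drop 1 = l' := by rw [hdrop]; rfl
      rwa [List.drop_drop] at this
    have hgetE : seq[i]'hlt = e := by
      have := List.getElem?_eq_getElem hlt
      rw [hget?] at this
      exact (Option.some.inj this).symm
    obtain ⟨ih0, ih1, ih2⟩ := ih (i + 1) hdrop' (by omega)
    have hcast : ((i : Int) + 1) = ((i + 1 : Nat) : Int) := by push_cast; ring
    rw [PySem.List.enumerate_cons]
    refine ⟨?_, ?_, ?_⟩
    · -- pd = 0
      intro acc t
      cases hC : PySem.Chars.isIn ['C'] e.toList with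
      | true =>
        rw [List.foldl_cons, show aStep ts (acc, none, t, 0) ((i : Int), e)
              = (acc, some (i : Int), some (PySem.List.pyGetD ts (i : Int) 0 + 6000), 1) from by
            simp [aStep, hC]]
        rw [hcast, ih1]
        have hstep := bMain_step seq ts (seq.length + 1) i acc (by omega) (by omega)
        rw [hstep]
        simp [hlt, hgetE, hC]
      | false =>
        rw [List.foldl_cons, show aStep ts (acc, none, t, 0) ((i : Int), e)
              = (acc, none, t, 0) from by simp [aStep, hC]]
        rw [hcast, ih0]
        have hstep := bMain_step seq ts (seq.length + 1) i acc (by omega) (by omega)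
        rw [hstep]
        simp [hlt, hgetE, hC]
    · -- pd = 1
      intro acc st t
      cases hC : PySem.Chars.isIn ['C'] e.toList with
      | true =>
        by_cases hT : t < ts[i]?.getD 0
        · rw [List.foldl_cons, show aStep ts (acc, some st, some t, 1) ((i : Int), e)
                = (acc ++ [(st, (i : Int) - 1)], none, some t, 2) from by
              simp [aStep, hC, hT]]
          rw [hcast, ih2]
          have hscan : bScan seq ts t seq.length i = i := by
            rw [bScan_step seq ts t seq.length i (by omega) (by omega)]
            simp [hlt, hgetE, hC, hT]
          have hskip : bSkip seq seq.length i = bSkip seq seq.length (i + 1) := by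
            rw [bSkip_step seq seq.length i (by omega) (by omega)]
            simp [hlt, hgetE, hC]
          rw [hscan, if_neg (by omega), hskip]
        · rw [List.foldl_cons, show aStep ts (acc, some st, some t, 1) ((i : Int), e)
                = (acc, some st, some t, 1) from by simp [aStep, hC, hT]]
          rw [hcast, ih1]
          have hscan : bScan seq ts t seq.length i = bScan seq ts t seq.length (i + 1) := by
            rw [bScan_step seq ts t seq.length i (by omega) (by omega)]
            simp [hlt, hgetE, hC, hT]
          rw [hscan]
      | false =>
        rw [List.foldl_cons, show aStep ts (acc, some st, some t, 1) ((i : Int), e)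
              = (acc, some st, some t, 1) from by simp [aStep, hC]]
        rw [hcast, ih1]
        have hscan : bScan seq ts t seq.length i = bScan seq ts t seq.length (i + 1) := by
          rw [bScan_step seq ts t seq.length i (by omega) (by omega)]
          simp [hlt, hgetE, hC]
        rw [hscan]
    · -- pd = 2
      intro acc t
      cases hC : PySem.Chars.isIn ['C'] e.toList with
      | true =>
        rw [List.foldl_cons, show aStep ts (acc, none, t, 2) ((i : Int), e)
              = (acc, none, t, 2) from by simp [aStep, hC]]
        rw [hcast, ih2]
        have hskip : bSkip seq seq.length i = bSkip seq seq.length (i + 1) := by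
          rw [bSkip_step seq seq.length i (by omega) (by omega)]
          simp [hlt, hgetE, hC]
        rw [hskip]
      | false =>
        rw [List.foldl_cons, show aStep ts (acc, none, t, 2) ((i : Int), e)
              = (acc, none, t, 0) from by simp [aStep, hC]]
        rw [hcast, ih0]
        have hskip : bSkip seq seq.length i = i := by
          rw [bSkip_step seq seq.length i (by omega) (by omega)]
          simp [hlt, hgetE, hC]
        have hmain : bMain seq ts (seq.length + 1) i acc
            = bMain seq ts (seq.length + 1) (i + 1) acc := by
          rw [bMain_step seq ts (seq.length + 1) i acc (by omega) (by omega)]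
          simp [hlt, hgetE, hC]
        rw [hskip, hmain]

-- ===== VERDICT (by name: the statement is the Claim_ definition above) =====
theorem find_c_segments1_spec : Claim_equal_find_c_segments1 := by
  intro seq ts _ _
  unfold Spec_find_c_segments1 find_c_segments1 find_c_segments1_alt
  have h := (pvLoop seq ts seq 0 (by simp) (by omega)).1 [] none
  simpa using h
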